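-- pv_equiv track=rewrite | github.com/pypi-data/pypi-mirror-41 | packages/WikidPadMP/WikidPadMP-2.4a1.dev1.tar.gz/WikidPadMP-2.4a1.dev1/WikidPad/user_extensions/mecplugins/toggle_list_and_table.py | join_list_to_table
-- ===== SOURCE A (Python) =====
-- def join_list_to_table(rawlist):
--
--     import sys
--     import re
--     import itertools
--     from sys import exit
--
--     if "|||\n" in rawlist:
--         raw_columns=rawlist.split("|||\n")
--         cols = [col.splitlines() for col in raw_columns]
--         if "" in [item for sublist in cols for item in sublist]:
--             cols = [col.split("\n\n") for col in raw_columns]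
--
--     elif "---\n" in rawlist:
--         rawrows=rawlist.split("---\n")
--         rows = [row.splitlines() for row in rawrows]
--         cols = list(itertools.zip_longest(*rows,fillvalue=''))
--     else:
--         return
--
--     number_of_rows = max([len(col) for col in cols])
--     formatted_cols = []
--
--     for col in cols:
--         #print col
--         rows = [row.strip() for row in col]
--         width = max([len(row) for row in rows])
--
--         rows = [row.ljust(width) for row in rows]
--         rows+= [' '*width]*(number_of_rows-len(rows))
--         formatted_cols.append(rows)
--
--     rows=list(zip(*formatted_cols))
--
--     combinedlist = []
--
--     for row in rows:
--         combinedlist.append(" ".join(row))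
--
--     new_text='\n'.join(combinedlist)
--
--     return new_text
-- ===== SOURCE B (Python) =====
-- def join_list_to_table(rawlist):
--     import itertools
--
--     # delimiter parse into column-major cols (same protocol as the original)
--     if "|||\n" in rawlist:
--         raw_columns = rawlist.split("|||\n")
--         cols = [col.splitlines() for col in raw_columns]
--         if "" in [item for sublist in cols for item in sublist]:
--             cols = [col.split("\n\n") for col in raw_columns]
--     elif "---\n" in rawlist:
--         rawrows = rawlist.split("---\n")
--         rows = [row.splitlines() for row in rawrows]
--         cols = list(itertools.zip_longest(*rows, fillvalue=''))
--     else: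
--         return
--
--     # row-major assembly: no padded column lists, no transpose
--     number_of_rows = max(len(col) for col in cols)
--     widths = [max(len(cell.strip()) for cell in col) for col in cols]
--     lines = []
--     for r in range(number_of_rows):
--         parts = []
--         for col, w in zip(cols, widths):
--             parts.append(col[r].strip().ljust(w) if r < len(col) else ' ' * w)
--         lines.append(' '.join(parts))
--     return '\n'.join(lines)
-- ===== Notes on version B (the rewrite author's own statement) =====
-- stated objective: alternative
-- what changed: After the same delimiter parse into column-major cols, B precomputes per-column widths and assembles the table row by row with an index loop, instead of A's pad-every-column-then-transpose-with-zip pipeline.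
import Mathlib
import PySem

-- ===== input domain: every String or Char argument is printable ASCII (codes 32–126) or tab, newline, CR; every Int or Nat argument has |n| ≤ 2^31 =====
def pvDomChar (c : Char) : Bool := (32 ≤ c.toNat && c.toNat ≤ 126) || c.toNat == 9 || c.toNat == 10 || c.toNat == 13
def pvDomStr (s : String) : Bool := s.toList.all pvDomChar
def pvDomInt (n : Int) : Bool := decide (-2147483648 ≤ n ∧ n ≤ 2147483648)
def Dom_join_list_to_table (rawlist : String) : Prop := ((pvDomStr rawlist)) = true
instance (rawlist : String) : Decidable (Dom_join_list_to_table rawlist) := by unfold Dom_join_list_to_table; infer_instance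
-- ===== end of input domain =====

-- B rebuilds the table row by row from precomputed column widths instead of padding
-- every column and transposing with zip (objective: alternative decomposition, same cost).


-- ===== PORT A =====
-- shared helpers: the delimiter parse (identical in A and in B, which keeps it unchanged)

-- s.split(sep) for the non-empty literal separators used here (split? is none only for sep = "")
def pvSplit (s sep : String) : List String := (PySem.Str.split? s sep).getD []

def pvSpaces (w : Int) : String := String.ofList (List.replicate w.toNat ' ')

-- s.ljust(w) (' ' fill; no-op when w ≤ len(s))
def pvLjust (s : String) (w : Int) : String :=
  String.ofList (s.toList ++ List.replicate (w - PySem.Str.len s).toNat ' ')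

lemma pvSumTailLt (ls : List (List String)) (h : ∃ l ∈ ls, l ≠ []) :
    (ls.map fun l => l.tail.length).sum < (ls.map fun l => l.length).sum := by
  induction ls with
  | nil => simp at h
  | cons x t ih =>
    rcases h with ⟨l, hl, hne⟩
    have hle : (t.map fun l => l.tail.length).sum ≤ (t.map fun l => l.length).sum := by
      apply List.sum_le_sum
      intro a ha
      simp only [List.length_tail]
      omega
    have hxle : x.tail.length ≤ x.length := by simp [List.length_tail]
    rcases List.mem_cons.mp hl with rfl | hmem
    · have : l.tail.length < l.length := by
        cases l with
        | nil => simp at hne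
        | cons a b => simp
      simp only [List.map_cons, List.sum_cons]
      omega
    · have := ih ⟨l, hmem, hne⟩
      simp only [List.map_cons, List.sum_cons]
      omega

-- itertools.zip_longest(*rows, fillvalue='') : emit one tuple per step while any iterator is live
def pvZipLongest (ls : List (List String)) : List (List String) :=
  if h : ls.all List.isEmpty then []
  else (ls.map fun l => l.headD "") :: pvZipLongest (ls.map List.tail)
termination_by (ls.map fun l => l.length).sum
decreasing_by
  have hex : ∃ l ∈ ls, l ≠ [] := by
    by_contra hc
    push Not at hc
    exact h (List.all_eq_true.mpr fun l hl => by simp [hc l hl])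
  simpa [List.map_map, Function.comp_def] using pvSumTailLt ls hex

-- zip(*formatted_cols) : truncate at the shortest list
def pvZipN (ls : List (List String)) : List (List String) :=
  if h : ls.isEmpty || ls.any List.isEmpty then []
  else (ls.map fun l => l.headD "") :: pvZipN (ls.map List.tail)
termination_by (ls.map fun l => l.length).sum
decreasing_by
  have hex : ∃ l ∈ ls, l ≠ [] := by
    simp only [Bool.or_eq_true, not_or, List.isEmpty_iff, List.any_eq_true, not_exists] at h
    obtain ⟨h1, h2⟩ := h
    cases ls with
    | nil => exact absurd rfl h1
    | cons x t =>
      refine ⟨x, List.mem_cons_self, ?_⟩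
      intro hx
      exact (h2 x ⟨List.mem_cons_self, by simp [hx]⟩)
  simpa [List.map_map, Function.comp_def] using pvSumTailLt ls hex

-- the branch ladder of A (and of B, unchanged there): delimiter parse into column-major cols;
-- none = the Python 'return' (None) of the final else
def pvParseCols (rawlist : String) : Option (List (List String)) :=
  if PySem.Str.isIn "|||\n" rawlist then
    let raw_columns := pvSplit rawlist "|||\n"
    let cols := raw_columns.map PySem.Str.splitlines
    if cols.flatten.contains "" then
      some (raw_columns.map fun col => pvSplit col "\n\n")
    else
      some cols
  else if PySem.Str.isIn "---\n" rawlist then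
    let rawrows := pvSplit rawlist "---\n"
    let rows := rawrows.map PySem.Str.splitlines
    some (pvZipLongest rows)
  else
    none

-- one iteration of A's main loop: strip the column, take its max width, ljust every
-- cell, pad with blank rows up to number_of_rows, append to the accumulator
-- (none = the pending ValueError of max() on an empty sequence)
def pvStepA (number_of_rows : Int) (acc : Option (List (List String)))
    (col : List String) : Option (List (List String)) :=
  acc.bind fun fcs =>
    (PySem.List.max? ((col.map PySem.Str.strip).map PySem.Str.len) (fun x => x)).map
      fun width =>
        fcs ++ [((col.map PySem.Str.strip).map fun r => pvLjust r width) ++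
                List.replicate (number_of_rows - (col.length : Int)).toNat (pvSpaces width)]

def join_list_to_table (rawlist : String) : Option String :=
  match pvParseCols rawlist with
  | none => none
  | some cols =>
    -- max([len(col) for col in cols]); none = ValueError on an empty sequence
    match PySem.List.max? (cols.map fun col => (col.length : Int)) (fun x => x) with
    | none => none
    | some number_of_rows =>
      -- for col in cols: strip, width = max(...), ljust, pad with blank rows, append
      match cols.foldl (pvStepA number_of_rows) (some []) with
      | none => none
      | some formatted_cols =>
        let rows := pvZipN formatted_cols
        let combinedlist := rows.foldl (fun acc row => acc ++ [PySem.Str.join " " row]) []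
        some (PySem.Str.join "\n" combinedlist)

-- ===== PORT B =====
-- one step of B's widths comprehension: max stripped cell length of one column
def pvStepB (acc : Option (List Int)) (col : List String) : Option (List Int) :=
  acc.bind fun ws =>
    (PySem.List.max? (col.map fun cell => PySem.Str.len (PySem.Str.strip cell)) (fun x => x)).map
      fun w => ws ++ [w]

def join_list_to_table_alt (rawlist : String) : Option String :=
  match pvParseCols rawlist with
  | none => none
  | some cols =>
    -- number_of_rows = max(len(col) for col in cols)
    match PySem.List.max? (cols.map fun col => (col.length : Int)) (fun x => x) with
    | none => none
    | some number_of_rows =>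
      -- widths = [max(len(cell.strip()) for cell in col) for col in cols]
      match cols.foldl pvStepB (some []) with
      | none => none
      | some widths =>
        -- for r in range(number_of_rows): one output line, cell by cell
        let lines := (PySem.List.pyRange 0 number_of_rows 1).map fun r =>
          PySem.Str.join " " ((cols.zip widths).map fun cw =>
            if r < (cw.1.length : Int) then
              pvLjust (PySem.Str.strip ((PySem.List.pyGet? cw.1 r).getD "")) cw.2
            else
              pvSpaces cw.2)
        some (PySem.Str.join "\n" lines)

-- ===== PRECONDITION & SPEC =====
-- Pre_ excludes exactly the inputs where Python A raises ValueError (max() of an empty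
-- sequence): a '|||\n' input with an empty split piece but no blank line triggering the
-- re-split, and a '---\n' input all of whose split pieces are empty.
def Pre_join_list_to_table (rawlist : String) : Prop :=
  if PySem.Str.isIn "|||\n" rawlist then
    ((pvSplit rawlist "|||\n").map PySem.Str.splitlines).flatten.contains "" = true ∨
      (pvSplit rawlist "|||\n").contains "" = false
  else if PySem.Str.isIn "---\n" rawlist then
    (pvSplit rawlist "---\n").all (fun r => r == "") = false
  else
    True
instance (rawlist : String) : Decidable (Pre_join_list_to_table rawlist) := by
  unfold Pre_join_list_to_table; infer_instance

def pvWitness_join_list_to_table : String := "a\nbb\n|||\nccc\nd"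

def Spec_join_list_to_table (rawlist : String) (out : Option String) : Prop := out = join_list_to_table_alt rawlist
instance (rawlist : String) (out : Option String) : Decidable (Spec_join_list_to_table rawlist out) := by unfold Spec_join_list_to_table; infer_instance

-- ===== CLAIM (what is proved, stated in full; the proofs are below) =====
def Claim_equal_join_list_to_table : Prop := ∀ (rawlist : String), Dom_join_list_to_table rawlist → Pre_join_list_to_table rawlist → Spec_join_list_to_table rawlist (join_list_to_table rawlist)

-- ===== LEMMAS AND PROOFS =====

-- zip(*ls) over equal-length lists is the row-indexed transpose
lemma pvZipN_eq_transpose :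
    ∀ (n : Nat) (ls : List (List String)), ls ≠ [] → (∀ l ∈ ls, l.length = n) →
      pvZipN ls = (List.range n).map fun k => ls.map fun l => l.getD k "" := by
  intro n
  induction n with
  | zero =>
    intro ls hne hlen
    rw [pvZipN.eq_def]
    have : ls.isEmpty || ls.any List.isEmpty := by
      cases ls with
      | nil => simp
      | cons x t =>
        simp only [Bool.or_eq_true, List.any_eq_true]
        exact Or.inr ⟨x, List.mem_cons_self, by
          simpa [List.isEmpty_iff, List.length_eq_zero_iff] using hlen x List.mem_cons_self⟩
    rw [dif_pos this]
    simp
  | succ m ih =>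
    intro ls hne hlen
    rw [pvZipN.eq_def]
    have hno : ¬(ls.isEmpty || ls.any List.isEmpty) := by
      simp only [Bool.or_eq_true, List.isEmpty_iff, List.any_eq_true, not_or, not_exists]
      refine ⟨hne, ?_⟩
      intro l ⟨hl, hemp⟩
      have := hlen l hl
      simp [hemp] at this
    rw [dif_neg hno]
    have htl : ∀ l ∈ ls.map List.tail, l.length = m := by
      intro l hl
      rcases List.mem_map.mp hl with ⟨l', hl', rfl⟩
      have := hlen l' hl'
      simp [List.length_tail, this]
    have htne : ls.map List.tail ≠ [] := by
      cases ls
      · exact absurd rfl hne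
      · simp
    rw [ih (ls.map List.tail) htne htl, List.range_succ_eq_map]
    simp only [List.map_cons, List.map_map]
    congr 1
    · apply List.map_congr_left
      intro l hl
      have hl0 : l ≠ [] := by
        intro h0
        have := hlen l hl
        simp [h0] at this
      cases l with
      | nil => exact absurd rfl hl0
      | cons a b => simp
    · apply List.map_congr_left
      intro k _
      apply List.map_congr_left
      intro l hl
      have hl0 : l ≠ [] := by
        intro h0
        have := hlen l hl
        simp [h0] at this
      cases l with
      | nil => exact absurd rfl hl0
      | cons a b => simp

-- none propagates through both loops
lemma pvFoldA_none (n : Int) (t : List (List String)) :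
    t.foldl (pvStepA n) none = none := by
  induction t with
  | nil => rfl
  | cons x r ih => simpa [pvStepA] using ih

lemma pvFoldB_none (t : List (List String)) :
    t.foldl pvStepB none = none := by
  induction t with
  | nil => rfl
  | cons x r ih => simpa [pvStepB] using ih

-- an empty column makes both loops fail (Python: ValueError from max())
lemma pvFoldA_fail (n : Int) (cols : List (List String)) (h : ∃ col ∈ cols, col = [])
    (init : List (List String)) : cols.foldl (pvStepA n) (some init) = none := by
  induction cols generalizing init with
  | nil => simp at h
  | cons col t ih =>
    by_cases hc : col = []
    · rw [List.foldl_cons]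
      have hstep : pvStepA n (some init) col = none := by
        simp [pvStepA, hc, PySem.List.max?]
      rw [hstep]
      exact pvFoldA_none n t
    · rcases h with ⟨col', hcol', h0⟩
      rcases List.mem_cons.mp hcol' with rfl | hmem
      · exact absurd h0 hc
      · rw [List.foldl_cons]
        rcases hA : pvStepA n (some init) col with _ | fcs
        · rw [pvFoldA_none n t]
        · exact (by simp [pvStepA] at hA; rcases hA with ⟨w, hw, rfl⟩; exact ih ⟨col', hmem, h0⟩ _)

lemma pvFoldB_fail (cols : List (List String)) (h : ∃ col ∈ cols, col = [])
    (init : List Int) : cols.foldl pvStepB (some init) = none := by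
  induction cols generalizing init with
  | nil => simp at h
  | cons col t ih =>
    by_cases hc : col = []
    · rw [List.foldl_cons]
      have hstep : pvStepB (some init) col = none := by
        simp [pvStepB, hc, PySem.List.max?]
      rw [hstep]
      exact pvFoldB_none t
    · rcases h with ⟨col', hcol', h0⟩
      rcases List.mem_cons.mp hcol' with rfl | hmem
      · exact absurd h0 hc
      · rw [List.foldl_cons]
        rcases hB : pvStepB (some init) col with _ | ws
        · rw [pvFoldB_none t]
        · exact (by simp [pvStepB] at hB; rcases hB with ⟨w, hw, rfl⟩; exact ih ⟨col', hmem, h0⟩ _)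

-- proof-side abbreviations: the width of a column and A's padded column
def pvW (col : List String) : Int :=
  (PySem.List.max? (col.map fun c => PySem.Str.len (PySem.Str.strip c)) (fun x => x)).getD 0

def pvFmt (n : Int) (col : List String) : List String :=
  ((col.map PySem.Str.strip).map fun r => pvLjust r (pvW col)) ++
    List.replicate (n - (col.length : Int)).toNat (pvSpaces (pvW col))

lemma pvW_some (col : List String) (h : col ≠ []) :
    PySem.List.max? (col.map fun c => PySem.Str.len (PySem.Str.strip c)) (fun x => x) =
      some (pvW col) := by
  cases hmx : PySem.List.max? (col.map fun c => PySem.Str.len (PySem.Str.strip c)) (fun x => x) with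
  | none =>
    rw [PySem.List.max?_eq_none_iff, List.map_eq_nil_iff] at hmx
    exact absurd hmx h
  | some w => simp only [pvW, hmx, Option.getD_some]

-- every column nonempty: the loops collect A's padded columns resp. B's widths
lemma pvFoldA_some (n : Int) (cols : List (List String)) (h : ∀ col ∈ cols, col ≠ [])
    (init : List (List String)) :
    cols.foldl (pvStepA n) (some init) = some (init ++ cols.map (pvFmt n)) := by
  induction cols generalizing init with
  | nil => simp
  | cons col t ih =>
    rw [List.foldl_cons]
    have hmx : PySem.List.max? ((col.map PySem.Str.strip).map PySem.Str.len) (fun x => x) =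
        some (pvW col) := by
      rw [List.map_map]
      simpa [Function.comp_def] using pvW_some col (h col List.mem_cons_self)
    have hstep : pvStepA n (some init) col = some (init ++ [pvFmt n col]) := by
      unfold pvStepA
      rw [Option.bind_some, hmx]
      rfl
    rw [hstep, ih (fun c hc => h c (List.mem_cons_of_mem _ hc))]
    simp

lemma pvFoldB_some (cols : List (List String)) (h : ∀ col ∈ cols, col ≠ [])
    (init : List Int) :
    cols.foldl pvStepB (some init) = some (init ++ cols.map pvW) := by
  induction cols generalizing init with
  | nil => simp
  | cons col t ih =>
    rw [List.foldl_cons]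
    have hstep : pvStepB (some init) col = some (init ++ [pvW col]) := by
      unfold pvStepB
      rw [Option.bind_some, pvW_some col (h col List.mem_cons_self)]
      rfl
    rw [hstep, ih (fun c hc => h c (List.mem_cons_of_mem _ hc))]
    simp

-- one table cell, read from A's padded column
lemma pvCellEq (N : Nat) (col : List String) (hle : col.length ≤ N) (k : Nat) (hk : k < N) :
    (pvFmt (N : Int) col).getD k "" =
      if (k : Int) < (col.length : Int) then
        pvLjust (PySem.Str.strip ((PySem.List.pyGet? col (k : Int)).getD "")) (pvW col)
      else pvSpaces (pvW col) := by
  rw [List.getD_eq_getElem?_getD, pvFmt, PySem.List.pyGet?_natCast]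
  by_cases hkc : k < col.length
  · rw [if_pos (by exact_mod_cast hkc)]
    rw [List.getElem?_append_left (by simpa using hkc)]
    simp [List.getElem?_map, List.getElem?_eq_getElem hkc]
  · rw [if_neg (by exact_mod_cast hkc)]
    rw [List.getElem?_append_right (by simpa using Nat.le_of_not_lt hkc)]
    have hcast : ((N : Int) - (col.length : Int)).toNat = N - col.length := by omega
    rw [List.getElem?_replicate, hcast]
    simp only [List.length_map]
    rw [if_pos (by omega)]
    rfl

-- the heart of the file: on any parsed cols, A's pad-and-transpose pipeline and
-- B's row-indexed assembly produce the same Option String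
lemma pvCoreEq (rawlist : String) :
    join_list_to_table rawlist = join_list_to_table_alt rawlist := by
  unfold join_list_to_table join_list_to_table_alt
  cases hp : pvParseCols rawlist with
  | none => rfl
  | some cols =>
    dsimp only
    cases hm : PySem.List.max? (cols.map fun col => (col.length : Int)) (fun x => x) with
    | none => rfl
    | some number_of_rows =>
      dsimp only
      -- number_of_rows is the length of some column, hence a Nat N
      obtain ⟨c0, hc0, hval⟩ := List.mem_map.mp (PySem.List.max?_mem hm)
      obtain ⟨N, hN⟩ : ∃ N : Nat, number_of_rows = (N : Int) := ⟨c0.length, hval.symm⟩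
      have hmax : ∀ col ∈ cols, col.length ≤ N := by
        intro col hcol
        have := PySem.List.max?_isMax hm ((col.length : Int)) (List.mem_map_of_mem hcol)
        simp only [hN] at this
        exact_mod_cast this
      by_cases hemp : ∃ col ∈ cols, col = []
      · -- some column is empty: both loops fail (Python: ValueError), both ports give none
        rw [pvFoldA_fail number_of_rows cols hemp [], pvFoldB_fail cols hemp []]
      · -- every column nonempty: both folds succeed
        have hne : ∀ col ∈ cols, col ≠ [] := by
          intro col hcol h0
          exact hemp ⟨col, hcol, h0⟩
        rw [pvFoldA_some number_of_rows cols hne [], pvFoldB_some cols hne []]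
        dsimp only
        simp only [List.nil_append]
        -- A side: transpose the padded columns
        have hlens : ∀ l ∈ cols.map (pvFmt number_of_rows), l.length = N := by
          intro l hl
          rcases List.mem_map.mp hl with ⟨col, hcol, rfl⟩
          have h1 := hmax col hcol
          simp only [pvFmt, List.length_append, List.length_map, List.length_replicate, hN]
          omega
        have hcne : cols ≠ [] := by
          intro h0
          rw [h0] at hc0
          exact absurd hc0 (List.not_mem_nil)
        have hmne : cols.map (pvFmt number_of_rows) ≠ [] := by
          cases cols
          · exact absurd rfl hcne
          · simp
        rw [pvZipN_eq_transpose N (cols.map (pvFmt number_of_rows)) hmne hlens]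
        rw [PySem.List.foldl_append_singleton_eq_map (PySem.Str.join " ") _ []]
        -- B side: range over Int becomes range over Nat
        rw [hN, PySem.List.pyRange_zero_natCast]
        have hzip : cols.zip (cols.map pvW) = cols.map fun c => (c, pvW c) := by
          simpa using @List.zip_map' _ _ _ id pvW cols
        rw [hzip]
        refine congrArg (fun l => some (PySem.Str.join "\n" l)) ?_
        simp only [List.nil_append, List.map_map, Function.comp_def]
        apply List.map_congr_left
        intro k hk
        have hkN : k < N := List.mem_range.mp hk
        refine congrArg (PySem.Str.join " ") ?_
        apply List.map_congr_left
        intro col hcol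
        have := pvCellEq N col (hmax col hcol) k hkN
        simpa using this

-- ===== VERDICT (by name: the statement is the Claim_ definition above) =====
theorem join_list_to_table_spec : Claim_equal_join_list_to_table := by
  intro rawlist _ _
  unfold Spec_join_list_to_table
  exact pvCoreEq rawlist
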